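-- pv_equiv track=rewrite | github.com/nervoushark/fqc-files | rtest0.py | get_main_pairs
-- ===== SOURCE A (Python) =====
-- def get_main_pairs(xsets, ysets):
--     csets = xsets.copy()
--     skip = 0 # true or false
--     curr = 0 # current element
--     level = 0 # deep lvl
--     index = 0 # counter for mapping xset -> yset
--     xtrue = [] # in this we put our data from xsets
--     ytrue = [] # in this we put our data from ysets
--     data_set = [] # here we put curr data
--     append_value = []
--     additional_class = 0
--     additional_count = 0
--     for cset in csets:
--         for n1 in cset:
--             curr = n1
--             data_set.append(curr)
--             for n2 in cset:
--                 curr = n2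
--                 data_set.append(curr)
--                 for n3 in cset:
--                     curr = n3
--                     data_set.append(curr)
--                     for n4 in cset:
--                         curr = n4
--                         data_set.append(curr)
--                         for n5 in cset:
--                             curr = n5
--                             data_set.append(curr)
--                             for n6 in cset:
--                                 curr = n6
--                                 data_set.append(curr)
--                                 xtrue.append(data_set.copy())
--                                 for x in cset:
--                                     if(cset.count(x) == data_set.count(x)):
--                                         append_value = ysets[index]
--                                     else:
--                                         if(additional_count%6 == 0):
--                                             additional_class -=1
--                                         append_value = [additional_class]
--                                         additional_count -= 1
--                                         break
--                                     ytrue.append(append_value.copy())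
--                                 data_set.pop()
--                             data_set.pop()
--                         data_set.pop()
--                     data_set.pop()
--                 data_set.pop()
--             data_set.pop()
--         index+=1
--
--     return xtrue, ytrue
-- ===== SOURCE B (Python) =====
-- def get_main_pairs(xsets, ysets):
--     xtrue = []
--     ytrue = []
--     for i, cset in enumerate(xsets):
--         n = len(cset)
--         if n == 0:
--             continue
--         y = ysets[i]
--         ccount = {}
--         for v in cset:
--             ccount[v] = ccount.get(v, 0) + 1
--         memo = {}
--         for j in range(n ** 6):
--             # j-th 6-tuple over cset in nested-loop order, by mixed-radix digits
--             t = []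
--             q = j
--             for _ in range(6):
--                 q, r = divmod(q, n)
--                 t.append(cset[r])
--             t.reverse()
--             xtrue.append(t)
--             key = tuple(sorted(t))
--             p = memo.get(key)
--             if p is None:
--                 tcount = {}
--                 for v in key:
--                     tcount[v] = tcount.get(v, 0) + 1
--                 p = 0
--                 for x in cset:
--                     if ccount[x] != tcount.get(x, 0):
--                         break
--                     p += 1
--                 memo[key] = p
--             ytrue.extend([list(y)] * p)
--     return xtrue, ytrue
-- ===== Notes on version B (the rewrite author's own statement) =====
-- stated objective: alternative
-- what changed: B replaces A's six nested loops over a shared push/pop buffer by a single flat loop over j in range(n**6) that builds the j-th tuple from its mixed-radix divmod digits, and replaces the per-tuple rescan of cset with list.count by a prefix-match length memoised in a dict keyed by the tuple's sorted key (one count-scan per distinct multiset), extending ytrue by list multiplication; the additional_class/append_value bookkeeping, which never reaches the output, is dropped.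
-- outside the precondition, e.g. on get_main_pairs([[1]], []): A returns ([[1, 1, 1, 1, 1, 1]], []), B raises IndexError
import Mathlib
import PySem

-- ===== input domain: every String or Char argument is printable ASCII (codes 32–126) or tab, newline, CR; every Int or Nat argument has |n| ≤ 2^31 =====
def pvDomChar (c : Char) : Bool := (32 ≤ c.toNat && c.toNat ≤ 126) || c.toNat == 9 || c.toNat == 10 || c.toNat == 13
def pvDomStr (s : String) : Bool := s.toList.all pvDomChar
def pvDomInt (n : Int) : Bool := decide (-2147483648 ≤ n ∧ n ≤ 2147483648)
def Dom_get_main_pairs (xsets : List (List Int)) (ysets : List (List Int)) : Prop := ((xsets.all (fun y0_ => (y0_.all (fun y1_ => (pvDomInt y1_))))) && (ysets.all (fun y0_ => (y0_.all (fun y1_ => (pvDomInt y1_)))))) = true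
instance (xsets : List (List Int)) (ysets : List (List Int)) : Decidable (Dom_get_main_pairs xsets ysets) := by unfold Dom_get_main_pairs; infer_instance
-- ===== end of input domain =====

-- B replaces A's six nested loops by a single mixed-radix index loop (j-th tuple by repeated divmod) and memoises the per-tuple prefix-match length by the tuple's sorted key (alternative formulation; not measured faster).


-- ===== PORT A =====
-- the innermost 'for x in cset' loop of A, with its break; state (ytrue, append_value, additional_class, additional_count)
def pvLoopX (cset ds : List Int) (ysets : List (List Int)) (index : Int)
    (ytrue : List (List Int)) (av : List Int) (ac cnt : Int) :
    List Int → List (List Int) × List Int × Int × Int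
  | [] => (ytrue, av, ac, cnt)
  | x :: xs =>
      if PySem.List.count cset x = PySem.List.count ds x then
        let av' := PySem.List.pyGetD ysets index []   -- ysets[index]; in range under Pre_
        pvLoopX cset ds ysets index (ytrue ++ [av']) av' ac cnt xs
      else
        if PySem.Int.mod cnt 6 = 0 then (ytrue, [ac - 1], ac - 1, cnt - 1)
        else (ytrue, [ac], ac, cnt - 1)

-- the six identical nested 'for nK in cset' loops of A, indexed by remaining depth;
-- ds is data_set (each level appends ds ++ [n] and the matching pop() restores ds);
-- state (xtrue, ytrue, append_value, additional_class, additional_count)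
def pvLvlA (cset : List Int) (ysets : List (List Int)) (index : Int) :
    Nat → List Int → List (List Int) × List (List Int) × List Int × Int × Int →
    List (List Int) × List (List Int) × List Int × Int × Int
  | 0, ds, (xt, yt, av, ac, cnt) =>
      let r := pvLoopX cset ds ysets index yt av ac cnt cset
      (xt ++ [ds], r.1, r.2.1, r.2.2.1, r.2.2.2)
  | k + 1, ds, s => cset.foldl (fun s' n => pvLvlA cset ysets index k (ds ++ [n]) s') s

def get_main_pairs (xsets : List (List Int)) (ysets : List (List Int)) :
    List (List Int) × List (List Int) :=
  let r := xsets.foldl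
    (fun (st : Int × List (List Int) × List (List Int) × List Int × Int × Int) cset =>
      let s' := pvLvlA cset ysets st.1 6 [] (st.2.1, st.2.2.1, st.2.2.2.1, st.2.2.2.2.1, st.2.2.2.2.2)
      (st.1 + 1, s'))
    (0, [], [], [], 0, 0)
  (r.2.1, r.2.2.1)

-- ===== PORT B =====
-- t = []; q = j; for _ in range(6): q, r = divmod(q, n); t.append(cset[r])   (digits low-to-high; t.reverse() at the call site)
def pvDigits (cset : List Int) (n : Int) : Nat → Int → List Int
  | 0, _ => []
  | k + 1, q =>
      PySem.List.pyGetD cset (PySem.Int.mod q n) 0 :: pvDigits cset n k (PySem.Int.floordiv q n)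

-- ccount[v] = ccount.get(v, 0) + 1 over a list (both counter loops of B)
def pvCounterB (l : List Int) : PySem.Dict Int Int :=
  l.foldl (fun d v => d.insert v (d.getD v 0 + 1)) PySem.Dict.empty

-- p = 0; for x in cset: if ccount[x] != tcount.get(x, 0): break; p += 1
def pvPlenB (cc tc : PySem.Dict Int Int) (p : Int) : List Int → Int
  | [] => p
  | x :: xs => if cc.getD x 0 ≠ tc.getD x 0 then p else pvPlenB cc tc (p + 1) xs

-- the body of B's j-loop: build the j-th tuple by divmod digits, look its sorted key up
-- in the memo (computing and storing the prefix length on a miss), extend ytrue by p copies of y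
def pvStepB (cset y : List Int) (cc : PySem.Dict Int Int)
    (st : List (List Int) × List (List Int) × PySem.Dict (List Int) Int) (j : Int) :
    List (List Int) × List (List Int) × PySem.Dict (List Int) Int :=
  let t := (pvDigits cset (cset.length : Int) 6 j).reverse
  let key := PySem.List.sorted t (fun v => v) false
  let pm : Int × PySem.Dict (List Int) Int :=
    match st.2.2.get? key with
    | some v => (v, st.2.2)
    | none =>
        let tc := pvCounterB key
        let v := pvPlenB cc tc 0 cset
        (v, st.2.2.insert key v)
  (st.1 ++ [t], st.2.1 ++ List.replicate pm.1.toNat y, pm.2)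

def get_main_pairs_alt (xsets : List (List Int)) (ysets : List (List Int)) :
    List (List Int) × List (List Int) :=
  (PySem.List.enumerate xsets 0).foldl
    (fun (acc : List (List Int) × List (List Int)) pr =>
      let cset := pr.2
      if cset.length = 0 then acc else
      let y := PySem.List.pyGetD ysets pr.1 []   -- ysets[i]; in range under Pre_
      let cc := pvCounterB cset
      let r := (PySem.List.pyRange 0 ((cset.length : Int) ^ 6) 1).foldl
        (pvStepB cset y cc) (acc.1, acc.2, PySem.Dict.empty)
      (r.1, r.2.1))
    ([], [])

-- ===== PRECONDITION & SPEC =====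
-- Pre_ excludes inputs where some cset with index beyond len(ysets) is nonempty: there Python B
-- raises IndexError at ysets[i], and Python A either raises IndexError at ysets[index] (whenever
-- that cset reaches a count match) or returns a value B cannot match.
def Pre_get_main_pairs (xsets : List (List Int)) (ysets : List (List Int)) : Prop :=
  ∀ c ∈ xsets.drop ysets.length, c = []
instance (xsets : List (List Int)) (ysets : List (List Int)) : Decidable (Pre_get_main_pairs xsets ysets) := by unfold Pre_get_main_pairs; infer_instance

def pvWitness_get_main_pairs : List (List Int) × List (List Int) := ([[0, 1]], [[7]])

def Spec_get_main_pairs (xsets : List (List Int)) (ysets : List (List Int)) (out : List (List Int) × List (List Int)) : Prop := out = get_main_pairs_alt xsets ysets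
instance (xsets : List (List Int)) (ysets : List (List Int)) (out : List (List Int) × List (List Int)) : Decidable (Spec_get_main_pairs xsets ysets out) := by unfold Spec_get_main_pairs; infer_instance

-- ===== CLAIM (what is proved, stated in full; the proofs are below) =====
def Claim_equal_get_main_pairs : Prop := ∀ (xsets : List (List Int)) (ysets : List (List Int)), Dom_get_main_pairs xsets ysets → Pre_get_main_pairs xsets ysets → Spec_get_main_pairs xsets ysets (get_main_pairs xsets ysets)

-- ===== LEMMAS AND PROOFS =====

-- the k-fold cartesian product of cset, last coordinate varying fastest
def pvT (cset : List Int) : Nat → List (List Int)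
  | 0 => [[]]
  | k + 1 => (pvT cset k).flatMap (fun t => cset.map (fun v => t ++ [v]))

-- the y-copies appended for one tuple t: one copy of y per leading x of cset whose
-- multiplicity in cset equals its multiplicity in t, stopping at the first mismatch
def pvGo (cset t y : List Int) : List Int → List (List Int)
  | [] => []
  | x :: xs =>
      if PySem.List.count cset x = PySem.List.count t x then y :: pvGo cset t y xs else []

-- length of the matching prefix of l (multiplicities compared between cset and t)
def pvPref (cset t : List Int) : List Int → Nat
  | [] => 0
  | x :: xs => if PySem.List.count cset x = PySem.List.count t x then pvPref cset t xs + 1 else 0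

-- spec of the whole run from a given starting index
def pvSpecY (ysets : List (List Int)) : Int → List (List Int) → List (List Int)
  | _, [] => []
  | idx, c :: cs =>
      (pvT c 6).flatMap (fun t => pvGo c t (PySem.List.pyGetD ysets idx []) c) ++
        pvSpecY ysets (idx + 1) cs

def pvSpecX : List (List Int) → List (List Int)
  | [] => []
  | c :: cs => pvT c 6 ++ pvSpecX cs

theorem pvLoopX_shape (cset ds : List Int) (ysets : List (List Int)) (index : Int) :
    ∀ (l : List Int) (yt : List (List Int)) (av : List Int) (ac cnt : Int),
      ∃ r, pvLoopX cset ds ysets index yt av ac cnt l =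
        (yt ++ pvGo cset ds (PySem.List.pyGetD ysets index []) l, r) := by
  intro l
  induction l with
  | nil => intro yt av ac cnt; exact ⟨(av, ac, cnt), by simp [pvLoopX, pvGo]⟩
  | cons x xs ih =>
    intro yt av ac cnt
    by_cases h : List.count x cset = List.count x ds
    · obtain ⟨r, hr⟩ := ih (yt ++ [PySem.List.pyGetD ysets index []])
        (PySem.List.pyGetD ysets index []) ac cnt
      exact ⟨r, by simp [pvLoopX, pvGo, h, hr]⟩
    · by_cases h6 : (6 : Int) ∣ cnt
      · exact ⟨([ac - 1], ac - 1, cnt - 1), by simp [pvLoopX, pvGo, h, h6]⟩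
      · exact ⟨([ac], ac, cnt - 1), by simp [pvLoopX, pvGo, h, h6]⟩

theorem pvT_succ_left (cset : List Int) (k : Nat) :
    pvT cset (k + 1) = cset.flatMap (fun n => (pvT cset k).map (fun t => n :: t)) := by
  induction k with
  | zero =>
    simp [pvT]
    exact List.map_eq_flatMap
  | succ k ih =>
    calc pvT cset (k + 2) = (pvT cset (k + 1)).flatMap (fun t => cset.map (fun v => t ++ [v])) := rfl
      _ = (cset.flatMap (fun n => (pvT cset k).map (fun t => n :: t))).flatMap
            (fun t => cset.map (fun v => t ++ [v])) := by rw [ih]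
      _ = cset.flatMap (fun n => (pvT cset (k + 1)).map (fun t => n :: t)) := by
            simp [pvT, List.flatMap_assoc, List.flatMap_map, List.map_flatMap,
              List.map_map, Function.comp_def]

theorem pvT_map_append (cset : List Int) (k : Nat) (ds : List Int) :
    (pvT cset (k + 1)).map (fun t => ds ++ t) =
      cset.flatMap (fun n => (pvT cset k).map (fun t => (ds ++ [n]) ++ t)) := by
  rw [pvT_succ_left]
  simp [List.map_flatMap, List.map_map, Function.comp_def]

theorem pvLvlA_shape (cset : List Int) (ysets : List (List Int)) (index : Int) :
    ∀ (k : Nat) (ds : List Int) (xt yt : List (List Int)) (av : List Int) (ac cnt : Int),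
      ∃ r, pvLvlA cset ysets index k ds (xt, yt, av, ac, cnt) =
        (xt ++ (pvT cset k).map (fun t => ds ++ t),
         yt ++ ((pvT cset k).map (fun t => ds ++ t)).flatMap
                 (fun t => pvGo cset t (PySem.List.pyGetD ysets index []) cset),
         r) := by
  intro k
  induction k with
  | zero =>
    intro ds xt yt av ac cnt
    obtain ⟨r, hr⟩ := pvLoopX_shape cset ds ysets index cset yt av ac cnt
    refine ⟨(r.1, r.2.1, r.2.2), ?_⟩
    simp [pvLvlA, hr, pvT]
  | succ k ih =>
    intro ds xt yt av ac cnt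
    have fold : ∀ (l : List Int) (xt yt : List (List Int)) (av : List Int) (ac cnt : Int),
        ∃ r, l.foldl (fun s' n => pvLvlA cset ysets index k (ds ++ [n]) s') (xt, yt, av, ac, cnt) =
          (xt ++ l.flatMap (fun n => (pvT cset k).map (fun t => (ds ++ [n]) ++ t)),
           yt ++ l.flatMap (fun n => ((pvT cset k).map (fun t => (ds ++ [n]) ++ t)).flatMap
                 (fun t => pvGo cset t (PySem.List.pyGetD ysets index []) cset)), r) := by
      intro l
      induction l with
      | nil => intro xt yt av ac cnt; exact ⟨(av, ac, cnt), by simp⟩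
      | cons n ns ihl =>
        intro xt yt av ac cnt
        obtain ⟨⟨av1, ac1, cnt1⟩, h1⟩ := ih (ds ++ [n]) xt yt av ac cnt
        obtain ⟨r, hr⟩ := ihl (xt ++ (pvT cset k).map (fun t => (ds ++ [n]) ++ t))
          (yt ++ ((pvT cset k).map (fun t => (ds ++ [n]) ++ t)).flatMap
            (fun t => pvGo cset t (PySem.List.pyGetD ysets index []) cset)) av1 ac1 cnt1
        refine ⟨r, ?_⟩
        simp only [List.foldl_cons]
        rw [h1, hr]
        simp [List.append_assoc]
    obtain ⟨r, hr⟩ := fold cset xt yt av ac cnt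
    refine ⟨r, ?_⟩
    show cset.foldl (fun s' n => pvLvlA cset ysets index k (ds ++ [n]) s') (xt, yt, av, ac, cnt) = _
    rw [hr, pvT_map_append]
    simp [List.flatMap_assoc]

theorem portA_eq (xsets ysets : List (List Int)) :
    get_main_pairs xsets ysets = (pvSpecX xsets, pvSpecY ysets 0 xsets) := by
  have main : ∀ (l : List (List Int)) (idx : Int) (xt yt : List (List Int))
      (av : List Int) (ac cnt : Int),
      ∃ r, l.foldl
          (fun (st : Int × List (List Int) × List (List Int) × List Int × Int × Int) cset =>
            (st.1 + 1, pvLvlA cset ysets st.1 6 []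
              (st.2.1, st.2.2.1, st.2.2.2.1, st.2.2.2.2.1, st.2.2.2.2.2)))
          (idx, xt, yt, av, ac, cnt) =
        (idx + l.length, xt ++ pvSpecX l, yt ++ pvSpecY ysets idx l, r) := by
    intro l
    induction l with
    | nil => intro idx xt yt av ac cnt; exact ⟨(av, ac, cnt), by simp [pvSpecX, pvSpecY]⟩
    | cons c cs ih =>
      intro idx xt yt av ac cnt
      obtain ⟨⟨av1, ac1, cnt1⟩, h1⟩ := pvLvlA_shape c ysets idx 6 [] xt yt av ac cnt
      obtain ⟨r, hr⟩ := ih (idx + 1)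
        (xt ++ (pvT c 6).map (fun t => [] ++ t))
        (yt ++ ((pvT c 6).map (fun t => [] ++ t)).flatMap
          (fun t => pvGo c t (PySem.List.pyGetD ysets idx []) c)) av1 ac1 cnt1
      refine ⟨r, ?_⟩
      simp only [List.foldl_cons, h1, hr]
      refine Prod.ext ?_ (Prod.ext ?_ (Prod.ext ?_ rfl))
      · simp; omega
      · simp [pvSpecX, List.append_assoc]
      · simp [pvSpecY, List.append_assoc]
  obtain ⟨r, hr⟩ := main xsets 0 [] [] [] 0 0
  show (_, _) = _
  rw [hr]
  simp

-- ===== B-side lemmas =====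

-- pvGo produces exactly (pvPref …) copies of y
theorem pvGo_eq_replicate (cset t y : List Int) (l : List Int) :
    pvGo cset t y l = List.replicate (pvPref cset t l) y := by
  induction l with
  | nil => simp [pvGo, pvPref]
  | cons x xs ih =>
    by_cases h : List.count x cset = List.count x t
    · simp [pvGo, pvPref, h, ih, List.replicate_succ]
    · simp [pvGo, pvPref, h]

theorem pvCounterB_getD (l : List Int) (v : Int) :
    (pvCounterB l).getD v 0 = (l.count v : Int) := by
  unfold pvCounterB
  rw [PySem.Dict.foldl_insert_getD_add_one_eq_counter, PySem.Dict.getD_counter]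

-- the plen scan computes p + prefix length
theorem pvPlenB_eq (cset s : List Int) (l : List Int) (p : Int) :
    pvPlenB (pvCounterB cset) (pvCounterB s) p l = p + (pvPref cset s l : Int) := by
  induction l generalizing p with
  | nil => simp [pvPlenB, pvPref]
  | cons x xs ih =>
    by_cases h : List.count x cset = List.count x s
    · simp [pvPlenB, pvPref, pvCounterB_getD, PySem.List.count_eq, h, ih]
      ring
    · simp [pvPlenB, pvPref, pvCounterB_getD, PySem.List.count_eq, h]

-- the prefix length only depends on the multiset of t: sorting t changes nothing
theorem pvPref_sorted (cset t : List Int) (l : List Int) :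
    pvPref cset (PySem.List.sorted t (fun v => v) false) l = pvPref cset t l := by
  induction l with
  | nil => rfl
  | cons x xs ih =>
    have hc : List.count x (PySem.List.sorted t (fun v => v) false) = List.count x t :=
      (PySem.List.sorted_perm t (fun v => v) false).count_eq x
    simp [pvPref, PySem.List.count_eq, hc, ih]

-- the memo-miss computation, as a pure function of the key
def pvF (cset : List Int) (key : List Int) : Int :=
  pvPlenB (pvCounterB cset) (pvCounterB key) 0 cset

theorem pvF_spec (cset t : List Int) :
    pvF cset (PySem.List.sorted t (fun v => v) false) = (pvPref cset t cset : Int) := by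
  unfold pvF
  rw [pvPlenB_eq, pvPref_sorted, zero_add]

theorem range_mul_flatMap (m n : Nat) :
    List.range (m * n) = (List.range m).flatMap (fun q => (List.range n).map (fun r => q * n + r)) := by
  induction m with
  | zero => simp
  | succ m ih =>
    rw [Nat.succ_mul, List.range_add, ih, List.range_succ]
    simp [Nat.add_comm]

theorem getD_range_self (l : List Int) (d : Int) :
    (List.range l.length).map (fun i => l.getD i d) = l := by
  apply List.ext_getElem
  · simp
  · intro i h1 h2
    simp [List.getD_eq_getElem?_getD, List.getElem?_eq_getElem h2]

-- mixed-radix enumeration lists exactly the k-fold product, in order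
theorem pvDigits_map_range (cset : List Int) (hn : cset ≠ []) (k : Nat) :
    (List.range (cset.length ^ k)).map
        (fun (j : Nat) => (pvDigits cset (cset.length : Int) k ((j : Nat) : Int)).reverse) =
      pvT cset k := by
  have hn' : 0 < cset.length := List.length_pos_iff.mpr hn
  induction k with
  | zero => simp [pvDigits, pvT]
  | succ k ih =>
    rw [pow_succ, range_mul_flatMap, List.map_flatMap]
    simp only [List.map_map]
    rw [show pvT cset (k+1) = (pvT cset k).flatMap (fun t => cset.map (fun v => t ++ [v])) from rfl, ← ih, List.flatMap_map]
    apply List.flatMap_congr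
    intro q hq
    have key : ∀ (t : List Int), cset.map (fun v => t ++ [v]) =
        (List.range cset.length).map (fun r => t ++ [cset.getD r 0]) := by
      intro t
      conv_lhs => rw [← getD_range_self cset 0]
      rw [List.map_map]
      rfl
    rw [key]
    apply List.map_congr_left
    intro r hr
    have hrn : r < cset.length := List.mem_range.mp hr
    simp only [Function.comp_apply]
    have hmod : PySem.Int.mod ((q * cset.length + r : Nat) : Int) (cset.length : Int) = (r : Int) := by
      push_cast
      rw [PySem.Int.mod_eq_emod_of_pos (by exact_mod_cast hn'), add_comm, Int.add_mul_emod_self_right,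
        Int.emod_eq_of_lt (by positivity) (by exact_mod_cast hrn)]
    have hdiv : PySem.Int.floordiv ((q * cset.length + r : Nat) : Int) (cset.length : Int) = (q : Int) := by
      push_cast
      rw [PySem.Int.floordiv_eq_iff_of_pos (by exact_mod_cast hn')]
      constructor
      · nlinarith [Int.natCast_nonneg r]
      · nlinarith [show ((r:Int)) < (cset.length : Int) by exact_mod_cast hrn, Int.natCast_nonneg q]
    rw [show pvDigits cset (cset.length : Int) (k+1) ((q * cset.length + r : Nat) : Int) =
        PySem.List.pyGetD cset (PySem.Int.mod ((q * cset.length + r : Nat) : Int) (cset.length : Int)) 0 ::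
          pvDigits cset (cset.length : Int) k (PySem.Int.floordiv ((q * cset.length + r : Nat) : Int) (cset.length : Int)) from rfl,
      hmod, hdiv]
    simp [PySem.List.pyGetD_natCast]

theorem pyRange_pow_map (cset : List Int) (hn : cset ≠ []) :
    (PySem.List.pyRange 0 ((cset.length : Int) ^ 6) 1).map
        (fun j => (pvDigits cset (cset.length : Int) 6 j).reverse) = pvT cset 6 := by
  rw [PySem.List.pyRange_one, sub_zero, ← Nat.cast_pow, Int.toNat_natCast, List.map_map]
  rw [← pvDigits_map_range cset hn 6]
  apply List.map_congr_left
  intro j _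
  simp

-- memo invariant: every stored value is the pure recomputation from its key
def pvInv (cset : List Int) (m : PySem.Dict (List Int) Int) : Prop :=
  ∀ k v, m.get? k = some v → v = pvF cset k

theorem pvStepB_shape (cset y : List Int) (j : Int)
    (st : List (List Int) × List (List Int) × PySem.Dict (List Int) Int)
    (hinv : pvInv cset st.2.2) :
    pvStepB cset y (pvCounterB cset) st j =
      (st.1 ++ [(pvDigits cset (cset.length : Int) 6 j).reverse],
       st.2.1 ++ pvGo cset ((pvDigits cset (cset.length : Int) 6 j).reverse) y cset,
       (pvStepB cset y (pvCounterB cset) st j).2.2) ∧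
    pvInv cset (pvStepB cset y (pvCounterB cset) st j).2.2 := by
  have hrep : ∀ t : List Int,
      List.replicate (pvF cset (PySem.List.sorted t (fun v => v) false)).toNat y =
        pvGo cset t y cset := by
    intro t
    rw [pvF_spec, Int.toNat_natCast, pvGo_eq_replicate]
  cases hget : st.2.2.get? (PySem.List.sorted ((pvDigits cset (cset.length : Int) 6 j).reverse) (fun v => v) false) with
  | some v =>
    have e : pvStepB cset y (pvCounterB cset) st j =
        (st.1 ++ [(pvDigits cset (cset.length : Int) 6 j).reverse],
         st.2.1 ++ List.replicate v.toNat y, st.2.2) := by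
      simp only [pvStepB, hget]
    refine ⟨?_, ?_⟩
    · rw [e, hinv _ _ hget, hrep]
    · rw [e]
      exact fun k w hw => hinv k w hw
  | none =>
    have e : pvStepB cset y (pvCounterB cset) st j =
        (st.1 ++ [(pvDigits cset (cset.length : Int) 6 j).reverse],
         st.2.1 ++ List.replicate (pvF cset (PySem.List.sorted ((pvDigits cset (cset.length : Int) 6 j).reverse) (fun v => v) false)).toNat y,
         st.2.2.insert (PySem.List.sorted ((pvDigits cset (cset.length : Int) 6 j).reverse) (fun v => v) false)
           (pvF cset (PySem.List.sorted ((pvDigits cset (cset.length : Int) 6 j).reverse) (fun v => v) false))) := by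
      simp only [pvStepB, hget]
      rfl
    refine ⟨?_, ?_⟩
    · rw [e, hrep]
    · rw [e]
      intro k w hw
      rw [PySem.Dict.get?_insert] at hw
      split at hw
      · cases hw
        subst ‹k = _›
        rfl
      · exact hinv k w hw

theorem foldl_pvStepB (cset y : List Int) (js : List Int) :
    ∀ (xt yt : List (List Int)) (m : PySem.Dict (List Int) Int), pvInv cset m →
      ∃ m', js.foldl (pvStepB cset y (pvCounterB cset)) (xt, yt, m) =
        (xt ++ js.map (fun j => (pvDigits cset (cset.length : Int) 6 j).reverse),
         yt ++ js.flatMap (fun j => pvGo cset ((pvDigits cset (cset.length : Int) 6 j).reverse) y cset),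
         m') := by
  induction js with
  | nil => intro xt yt m _; exact ⟨m, by simp⟩
  | cons j js ih =>
    intro xt yt m hm
    obtain ⟨hshape, hinv'⟩ := pvStepB_shape cset y j (xt, yt, m) hm
    obtain ⟨m', hm'⟩ := ih (xt ++ [(pvDigits cset (cset.length : Int) 6 j).reverse])
      (yt ++ pvGo cset ((pvDigits cset (cset.length : Int) 6 j).reverse) y cset)
      (pvStepB cset y (pvCounterB cset) (xt, yt, m) j).2.2 hinv'
    refine ⟨m', ?_⟩
    simp only [List.foldl_cons]
    rw [hshape, hm']
    simp [List.append_assoc]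

theorem portB_eq (xsets ysets : List (List Int)) :
    get_main_pairs_alt xsets ysets = (pvSpecX xsets, pvSpecY ysets 0 xsets) := by
  have main : ∀ (l : List (List Int)) (i : Int) (xt yt : List (List Int)),
      (PySem.List.enumerate l i).foldl
        (fun (acc : List (List Int) × List (List Int)) pr =>
          if pr.2.length = 0 then acc else
          let y := PySem.List.pyGetD ysets pr.1 []
          let r := (PySem.List.pyRange 0 ((pr.2.length : Int) ^ 6) 1).foldl
            (pvStepB pr.2 y (pvCounterB pr.2)) (acc.1, acc.2, PySem.Dict.empty)
          (r.1, r.2.1))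
        (xt, yt) =
      (xt ++ pvSpecX l, yt ++ pvSpecY ysets i l) := by
    intro l
    induction l with
    | nil => intro i xt yt; simp [PySem.List.enumerate_nil, pvSpecX, pvSpecY]
    | cons c cs ih =>
      intro i xt yt
      rw [PySem.List.enumerate_cons, List.foldl_cons]
      by_cases hc : c.length = 0
      · have hcnil : c = [] := List.length_eq_zero_iff.mp hc
        rw [if_pos hc, ih]
        subst hcnil
        simp [pvSpecX, pvSpecY, show pvT ([] : List Int) 6 = [] from rfl]
      · rw [if_neg hc]
        have hne : c ≠ [] := fun h => hc (by simp [h])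
        obtain ⟨m', hm'⟩ := foldl_pvStepB c (PySem.List.pyGetD ysets i [])
          (PySem.List.pyRange 0 ((c.length : Int) ^ 6) 1) xt yt PySem.Dict.empty
          (fun k v h => by simp [PySem.Dict.get?_empty] at h)
        simp only [hm', ih]
        rw [pyRange_pow_map c hne,
          show (PySem.List.pyRange 0 ((c.length : Int) ^ 6) 1).flatMap
              (fun j => pvGo c ((pvDigits c (c.length : Int) 6 j).reverse) (PySem.List.pyGetD ysets i []) c) =
            ((PySem.List.pyRange 0 ((c.length : Int) ^ 6) 1).map
              (fun j => (pvDigits c (c.length : Int) 6 j).reverse)).flatMap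
              (fun t => pvGo c t (PySem.List.pyGetD ysets i []) c) from
            (List.flatMap_map (fun j => (pvDigits c (c.length : Int) 6 j).reverse)
              (fun t => pvGo c t (PySem.List.pyGetD ysets i []) c)
              (PySem.List.pyRange 0 ((c.length : Int) ^ 6) 1)).symm,
          pyRange_pow_map c hne]
        simp [pvSpecX, pvSpecY, List.append_assoc]
  show (PySem.List.enumerate xsets 0).foldl _ ([], []) = _
  rw [main xsets 0 [] []]
  simp

-- ===== VERDICT (by name: the statement is the Claim_ definition above) =====
theorem get_main_pairs_spec : Claim_equal_get_main_pairs := by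
  intro xsets ysets _ _
  unfold Spec_get_main_pairs
  rw [portA_eq, portB_eq]
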